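-- pv_equiv track=rewrite | github.com/mvrck96/news_buddy | bot/habr_parser.py | filter_digest
-- ===== SOURCE A (Python) =====
-- from itertools import chain
-- from typing import Dict, Tuple
--
-- def filter_digest(digest: Dict) -> Dict:
--     filtered_digest = {}
--     for key, value in digest.items():
--         filtered_digest[key] = []
--         for tup in value:
--             if tup not in chain(*filtered_digest.values()):
--                 filtered_digest[key].append(tup)
--     filtered_digest = {
--         key: value for key, value in filtered_digest.items() if value != []
--     }
--     return filtered_digest
-- ===== SOURCE B (Python) =====
-- def filter_digest(digest):
--     # Different strategy: never consult the output being built. A tuple is kept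
--     # iff it is a first occurrence w.r.t. the RAW input sequence (first occurrence
--     # w.r.t. the kept output coincides with it, since the first raw occurrence is
--     # always kept). So: locally dedup each value, then filter it against the raw
--     # preceding values.
--     prev = []
--     result = {}
--     for key, value in digest.items():
--         uniq = []
--         for t in value:
--             if t not in uniq:
--                 uniq.append(t)
--         kept = [t for t in uniq if t not in prev]
--         if kept:
--             result[key] = kept
--         prev += value
--     return result
-- ===== Notes on version B (the rewrite author's own statement) =====
-- stated objective: alternative
-- what changed: A decides membership against the kept output it is building (chain over filtered_digest.values()); B never looks at its output: it locally dedups each value and filters it against the raw preceding input values, relying on the invariant that first occurrence w.r.t. kept output equals first occurrence w.r.t. raw input, and it drops empty groups inline instead of a final dict comprehension.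
import Mathlib
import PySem

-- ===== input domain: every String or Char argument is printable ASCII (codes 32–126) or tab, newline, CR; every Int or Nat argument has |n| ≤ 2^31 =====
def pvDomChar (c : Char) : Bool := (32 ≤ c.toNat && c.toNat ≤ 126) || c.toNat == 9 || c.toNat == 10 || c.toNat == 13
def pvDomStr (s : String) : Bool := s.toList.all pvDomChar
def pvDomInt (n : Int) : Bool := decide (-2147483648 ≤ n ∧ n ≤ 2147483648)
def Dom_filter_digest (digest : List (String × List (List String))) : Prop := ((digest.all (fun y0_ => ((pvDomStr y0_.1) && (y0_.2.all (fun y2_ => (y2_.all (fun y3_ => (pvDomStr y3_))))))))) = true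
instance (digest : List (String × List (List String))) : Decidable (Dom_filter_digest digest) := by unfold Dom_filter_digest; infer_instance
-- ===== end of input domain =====

-- B never consults the output being built: it locally dedups each value and filters
-- it against the raw preceding input values (first occurrence w.r.t. kept output
-- equals first occurrence w.r.t. raw input); a different strategy, not claimed faster.


-- ===== PORT A =====
def filter_digest (digest : List (String × List (List String))) : List (String × List (List String)) :=
  let fd : PySem.Dict String (List (List String)) :=
    digest.foldl (fun fd kv =>
      let fd := fd.insert kv.1 []
      kv.2.foldl (fun fd tup =>
        if (fd.values.flatten).contains tup then fd
        else fd.modify kv.1 [] (· ++ [tup])) fd)        -- filtered_digest[key].append(tup)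
      PySem.Dict.empty
  -- {key: value for key, value in filtered_digest.items() if value != []}
  (fd.items.foldl (fun d kv => if kv.2 ≠ [] then d.insert kv.1 kv.2 else d) PySem.Dict.empty).items

-- ===== PORT B =====
def filter_digest_alt (digest : List (String × List (List String))) : List (String × List (List String)) :=
  let st :=
    digest.foldl (fun (st : PySem.Dict String (List (List String)) × List (List String)) kv =>
      -- uniq = local first occurrences of the value
      let uniq := kv.2.foldl (fun u t => if u.contains t then u else u ++ [t]) ([] : List (List String))
      -- kept = [t for t in uniq if t not in prev]
      let kept := uniq.filter (fun t => !st.2.contains t)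
      let d := if kept ≠ [] then st.1.insert kv.1 kept else st.1
      (d, st.2 ++ kv.2))                                 -- prev += value
      (PySem.Dict.empty, [])
  st.1.items

-- ===== PRECONDITION & SPEC =====
-- Pre_ excludes association lists with duplicate keys: the Python argument is a dict, in which
-- duplicate keys cannot occur, so such lists do not correspond to any Python input of A.
def Pre_filter_digest (digest : List (String × List (List String))) : Prop :=
  (digest.map Prod.fst).Nodup
instance (digest : List (String × List (List String))) : Decidable (Pre_filter_digest digest) := by unfold Pre_filter_digest; infer_instance
def pvWitness_filter_digest : (List (String × List (List String))) :=
  [("a", [["x"], ["y"]]), ("b", [["x"], ["z"]])]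
def Spec_filter_digest (digest : List (String × List (List String))) (out : List (String × List (List String))) : Prop := out = filter_digest_alt digest
instance (digest : List (String × List (List String))) (out : List (String × List (List String))) : Decidable (Spec_filter_digest digest out) := by unfold Spec_filter_digest; infer_instance

-- ===== CLAIM (what is proved, stated in full; the proofs are below) =====
def Claim_equal_filter_digest : Prop := ∀ (digest : List (String × List (List String))), Dom_filter_digest digest → Pre_filter_digest digest → Spec_filter_digest digest (filter_digest digest)

-- ===== LEMMAS AND PROOFS =====

-- `keep S v`: the tuples of `v` that are first occurrences relative to the seen-list `S`.
def keep (S : List (List String)) : List (List String) → List (List String)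
  | [] => []
  | t :: ts => if S.contains t then keep S ts else t :: keep (S ++ [t]) ts

-- The groups A builds (before dropping empty values), as a function of the seen-list.
def groups (S : List (List String)) : List (String × List (List String)) → List (String × List (List String))
  | [] => []
  | (k, v) :: rest => (k, keep S v) :: groups (S ++ keep S v) rest

theorem map_fst_groups (entries : List (String × List (List String))) :
    ∀ S, (groups S entries).map Prod.fst = entries.map Prod.fst := by
  induction entries with
  | nil => intro S; rfl
  | cons kv rest ih => obtain ⟨k, v⟩ := kv; intro S; simp [groups, ih]

theorem no_key (pre : List (String × List (List String))) (k : String)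
    (hk : k ∉ pre.map Prod.fst) : ∀ p ∈ pre, (p.1 == k) = false := by
  intro p hp
  refine beq_eq_false_iff_ne.mpr ?_
  rintro rfl
  exact hk (List.mem_map_of_mem hp)

-- fresh-key insert appends.
theorem insert_fresh (pre : List (String × List (List String))) (k : String)
    (v : List (List String)) (hk : (pre.map Prod.fst).contains k = false) :
    (PySem.Dict.mk pre).insert k v = PySem.Dict.mk (pre ++ [(k, v)]) := by
  have hall := no_key pre k (by simpa using hk)
  have hcont : (pre.any fun p => p.1 == k) = false := by
    simp only [List.any_eq_false]
    intro p hp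
    simp [hall p hp]
  simp [PySem.Dict.insert, PySem.Dict.contains, hcont]

-- modify on a key that sits last, with no earlier occurrence, appends to its value.
theorem modify_last (pre : List (String × List (List String))) (k : String)
    (cur : List (List String)) (t : List String)
    (hk : (pre.map Prod.fst).contains k = false) :
    (PySem.Dict.mk (pre ++ [(k, cur)])).modify k [] (· ++ [t])
      = PySem.Dict.mk (pre ++ [(k, cur ++ [t])]) := by
  have hall := no_key pre k (by simpa using hk)
  have hfind : List.find? (fun p => p.1 == k) (pre ++ [(k, cur)]) = some (k, cur) := by
    rw [List.find?_append, List.find?_eq_none.mpr (fun p hp => by simp [hall p hp])]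
    simp
  have hcont : ((pre ++ [(k, cur)]).any fun p => p.1 == k) = true := by simp
  have hmap : pre.map (fun p => if (p.1 == k) = true then (k, cur ++ [t]) else p) = pre := by
    rw [List.map_congr_left (g := id) (fun p hp => by simp [hall p hp]), List.map_id]
  simp only [PySem.Dict.modify, PySem.Dict.insert, PySem.Dict.getD, PySem.Dict.get?,
    PySem.Dict.contains, hcont, hfind, if_true, Option.map_some, Option.getD_some]
  congr 1
  rw [List.map_append, hmap]
  simp

theorem A_inner (v : List (List String)) :
    ∀ (pre : List (String × List (List String))) (k : String) (cur : List (List String)),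
    (pre.map Prod.fst).contains k = false →
    v.foldl (fun fd tup =>
        if (fd.values.flatten).contains tup then fd
        else fd.modify k [] (· ++ [tup])) (PySem.Dict.mk (pre ++ [(k, cur)]))
      = PySem.Dict.mk (pre ++ [(k, cur ++ keep ((pre.map Prod.snd).flatten ++ cur) v)]) := by
  induction v with
  | nil => intro pre k cur hk; simp [keep]
  | cons t ts ih =>
    intro pre k cur hk
    have hvals : (PySem.Dict.mk (pre ++ [(k, cur)])).values.flatten
        = (pre.map Prod.snd).flatten ++ cur := by
      simp [PySem.Dict.values]
    rw [List.foldl_cons]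
    by_cases hmem : (((pre.map Prod.snd).flatten ++ cur).contains t) = true
    · rw [if_pos (by rw [hvals]; exact hmem), ih pre k cur hk, keep, if_pos hmem]
    · rw [if_neg (by rw [hvals]; exact hmem), modify_last pre k cur t hk,
        ih pre k (cur ++ [t]) hk, keep, if_neg hmem]
      simp

theorem A_outer (entries : List (String × List (List String))) :
    ∀ (pre : List (String × List (List String))),
    ((pre ++ entries).map Prod.fst).Nodup →
    entries.foldl (fun fd kv =>
        let fd := fd.insert kv.1 []
        kv.2.foldl (fun fd tup =>
          if (fd.values.flatten).contains tup then fd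
          else fd.modify kv.1 [] (· ++ [tup])) fd) (PySem.Dict.mk pre)
      = PySem.Dict.mk (pre ++ groups ((pre.map Prod.snd).flatten) entries) := by
  induction entries with
  | nil => intro pre _; simp [groups]
  | cons kv rest ih =>
    intro pre hnd
    obtain ⟨k, v⟩ := kv
    rw [List.map_append, List.map_cons] at hnd
    have hk' : k ∉ pre.map Prod.fst := fun h => (List.nodup_append.mp hnd).2.2 k h k (List.mem_cons_self ..) rfl
    have hk : (pre.map Prod.fst).contains k = false := by simpa using hk'
    rw [List.foldl_cons]
    dsimp only
    rw [insert_fresh pre k [] hk, A_inner v pre k [] hk]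
    rw [ih (pre ++ [(k, [] ++ keep ((pre.map Prod.snd).flatten ++ []) v)]) (by simpa using hnd)]
    simp [groups, List.append_assoc]

theorem A_filter (l : List (String × List (List String))) :
    ∀ (acc : List (String × List (List String))),
    ((acc ++ l).map Prod.fst).Nodup →
    (l.foldl (fun d kv => if kv.2 ≠ [] then d.insert kv.1 kv.2 else d)
        (PySem.Dict.mk acc)).items
      = acc ++ l.filter (fun kv => kv.2 ≠ []) := by
  induction l with
  | nil => intro acc _; simp
  | cons kv l ih =>
    intro acc hnd
    obtain ⟨k, v⟩ := kv
    have hk : (acc.map Prod.fst).contains k = false := by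
      rw [List.map_append, List.map_cons] at hnd
      have hk' : k ∉ acc.map Prod.fst :=
        fun h => (List.nodup_append.mp hnd).2.2 k h k (List.mem_cons_self ..) rfl
      simpa using hk'
    rw [List.foldl_cons]
    by_cases hv : v = []
    · subst hv
      rw [if_neg (by simp)]
      rw [ih acc (hnd.sublist (List.Sublist.map _
        ((List.sublist_cons_self (k, ([] : List (List String))) l).append_left acc)))]
      simp
    · rw [if_pos (by simpa using hv), insert_fresh acc k v hk]
      rw [ih (acc ++ [(k, v)]) (by simpa using hnd)]
      simp [hv]

-- keep only depends on the membership predicate of the seen-list.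
theorem keep_congr (v : List (List String)) :
    ∀ S S', (∀ t, S.contains t = S'.contains t) → keep S v = keep S' v := by
  induction v with
  | nil => intro S S' _; rfl
  | cons t ts ih =>
    intro S S' h
    simp only [keep, h t]
    by_cases hm : (S'.contains t) = true
    · rw [if_pos hm, if_pos hm]; exact ih S S' h
    · rw [if_neg hm, if_neg hm]
      congr 1
      refine ih (S ++ [t]) (S' ++ [t]) (fun x => ?_)
      simpa using congrArg (fun b => b || decide (x = t)) (h x)

-- splitting the seen-list: a prefix S only acts as a filter.
theorem keep_split (v : List (List String)) :
    ∀ S T, keep (S ++ T) v = (keep T v).filter (fun t => !S.contains t) := by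
  induction v with
  | nil => intro S T; rfl
  | cons t ts ih =>
    intro S T
    by_cases hT : t ∈ T
    · have h1 : ((S ++ T).contains t) = true := by simp [hT]
      have h2 : (T.contains t) = true := by simp [hT]
      simp only [keep, h1, h2, if_true, ih]
    · have h2 : (T.contains t) = false := by simpa using hT
      by_cases hS : t ∈ S
      · have h1 : ((S ++ T).contains t) = true := by simp [hS]
        simp only [keep, h1, h2, Bool.false_eq_true, if_true, if_false]
        rw [List.filter_cons_of_neg (by simp [hS])]
        rw [← ih S (T ++ [t])]
        refine keep_congr ts _ _ (fun x => ?_)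
        by_cases hx : x = t <;> simp [hx, hS]
      · have h1 : ((S ++ T).contains t) = false := by simp [hS, hT]
        simp only [keep, h1, h2, Bool.false_eq_true, if_false]
        rw [List.filter_cons_of_pos (by simp [hS])]
        rw [← ih S (T ++ [t])]
        simp [List.append_assoc]

-- membership after keeping = membership of the raw list.
theorem contains_keep (v : List (List String)) :
    ∀ S x, ((S ++ keep S v).contains x) = ((S ++ v).contains x) := by
  induction v with
  | nil => intro S x; simp [keep]
  | cons t ts ih =>
    intro S x
    by_cases hm : t ∈ S
    · have hm' : (S.contains t) = true := by simp [hm]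
      simp only [keep, hm', if_true, ih]
      by_cases hx : x = t <;> simp [hx, hm]
    · have hm' : (S.contains t) = false := by simpa using hm
      simp only [keep, hm', Bool.false_eq_true, if_false]
      have := ih (S ++ [t]) x
      simp only [List.append_assoc] at this ⊢
      simpa using this

-- the local dedup fold is `keep` from the accumulator.
theorem fold_uniq (v : List (List String)) :
    ∀ u, v.foldl (fun u t => if u.contains t then u else u ++ [t]) u = u ++ keep u v := by
  induction v with
  | nil => intro u; simp [keep]
  | cons t ts ih =>
    intro u
    rw [List.foldl_cons]
    by_cases hm : (u.contains t) = true
    · simp only [keep, hm, if_true, ih]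
    · simp only [keep, hm, ih]
      simp [List.append_assoc]

-- B's main loop: dict accumulates the nonempty groups, prev accumulates the raw values.
theorem B_outer (entries : List (String × List (List String))) :
    ∀ (acc : List (String × List (List String))) (S P : List (List String)),
    (∀ t, P.contains t = S.contains t) →
    ((acc.map Prod.fst ++ entries.map Prod.fst).Nodup) →
    entries.foldl (fun (st : PySem.Dict String (List (List String)) × List (List String)) kv =>
        let uniq := kv.2.foldl (fun u t => if u.contains t then u else u ++ [t]) ([] : List (List String))
        let kept := uniq.filter (fun t => !st.2.contains t)
        let d := if kept ≠ [] then st.1.insert kv.1 kept else st.1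
        (d, st.2 ++ kv.2)) (PySem.Dict.mk acc, P)
      = (PySem.Dict.mk (acc ++ (groups S entries).filter (fun kv => kv.2 ≠ [])),
         P ++ (entries.map Prod.snd).flatten) := by
  induction entries with
  | nil => intro acc S P _ _; simp [groups]
  | cons kv rest ih =>
    intro acc S P hPS hnd
    obtain ⟨k, v⟩ := kv
    rw [List.foldl_cons]
    dsimp only
    have hkept : (v.foldl (fun u t => if u.contains t then u else u ++ [t]) ([] : List (List String))).filter
        (fun t => !P.contains t) = keep S v := by
      rw [fold_uniq, List.nil_append]
      have h1 : keep (P ++ []) v = (keep [] v).filter (fun t => !P.contains t) := keep_split v P []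
      rw [List.append_nil] at h1
      rw [← h1]
      exact keep_congr v _ _ hPS
    rw [hkept]
    have hPS' : ∀ t, ((P ++ v).contains t) = ((S ++ keep S v).contains t) := by
      intro t
      rw [contains_keep]
      simpa using congrArg (fun b => b || decide (t ∈ v)) (hPS t)
    have hk : (acc.map Prod.fst).contains k = false := by
      rw [List.map_cons] at hnd
      have hk' : k ∉ acc.map Prod.fst :=
        fun h => (List.nodup_append.mp hnd).2.2 k h k (List.mem_cons_self ..) rfl
      simpa using hk'
    have hnd' : ((acc.map Prod.fst) ++ (rest.map Prod.fst)).Nodup := by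
      rw [List.map_cons] at hnd
      exact hnd.sublist ((List.sublist_cons_self _ _).append_left _)
    by_cases hv : keep S v = []
    · rw [if_neg (by simp [hv])]
      rw [ih acc (S ++ keep S v) (P ++ v) hPS' hnd']
      simp [groups, hv, List.append_assoc]
    · rw [if_pos (by simpa using hv), insert_fresh acc k (keep S v) hk]
      have hnd'' : (((acc ++ [(k, keep S v)]).map Prod.fst) ++ (rest.map Prod.fst)).Nodup := by
        rw [List.map_cons] at hnd
        simpa using hnd
      rw [ih (acc ++ [(k, keep S v)]) (S ++ keep S v) (P ++ v) hPS' hnd'']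
      simp [groups, hv, List.append_assoc]

-- ===== VERDICT (by name: the statement is the Claim_ definition above) =====
theorem filter_digest_spec : Claim_equal_filter_digest := by
  intro digest _hdom hpre
  unfold Spec_filter_digest filter_digest filter_digest_alt
  dsimp only
  have he : (PySem.Dict.empty : PySem.Dict String (List (List String))) = PySem.Dict.mk [] := rfl
  rw [he]
  rw [A_outer digest [] (by simpa using hpre)]
  rw [B_outer digest [] [] [] (by intro t; rfl) (by simpa using hpre)]
  dsimp only
  simp only [List.nil_append, List.map_nil, List.flatten_nil]
  rw [A_filter (groups [] digest) [] (by simpa [map_fst_groups] using hpre)]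
  simp
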